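-- pv_equiv track=rewrite | github.com/omkhar/workcell | scripts/lib/manage_saved_credentials.py | bracket_balance
-- ===== SOURCE A (Python) =====
-- def strip_inline_comment(text: str) -> str:
--     result: list[str] = []
--     in_single = False
--     in_double = False
--     escape = False
--
--     for char in text:
--         if in_double:
--             result.append(char)
--             if escape:
--                 escape = False
--             elif char == "\\":
--                 escape = True
--             elif char == '"':
--                 in_double = False
--             continue
--         if in_single:
--             result.append(char)
--             if char == "'":
--                 in_single = False
--             continue
--         if char == '"':
--             in_double = True
--             result.append(char)
--             continue
--         if char == "'":
--             in_single = True
--             result.append(char)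
--             continue
--         if char == "#":
--             break
--         result.append(char)
--     return "".join(result)
--
-- def bracket_balance(text: str) -> int:
--     balance = 0
--     in_single = False
--     in_double = False
--     escape = False
--
--     for char in strip_inline_comment(text):
--         if in_double:
--             if escape:
--                 escape = False
--             elif char == "\\":
--                 escape = True
--             elif char == '"':
--                 in_double = False
--             continue
--         if in_single:
--             if char == "'":
--                 in_single = False
--             continue
--         if char == '"':
--             in_double = True
--             continue
--         if char == "'":
--             in_single = True
--             continue
--         if char == "[":
--             balance += 1
--         elif char == "]":
--             balance -= 1
--     return balance
-- ===== SOURCE B (Python) =====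
-- def bracket_balance(text: str) -> int:
--     balance = 0
--     in_single = False
--     in_double = False
--     escape = False
--     for char in text:
--         if in_double:
--             if escape:
--                 escape = False
--             elif char == "\\":
--                 escape = True
--             elif char == '"':
--                 in_double = False
--             continue
--         if in_single:
--             if char == "'":
--                 in_single = False
--             continue
--         if char == '"':
--             in_double = True
--             continue
--         if char == "'":
--             in_single = True
--             continue
--         if char == "#":
--             break
--         if char == "[":
--             balance += 1
--         elif char == "]":
--             balance -= 1
--     return balance
-- ===== Notes on version B (the rewrite author's own statement) =====
-- stated objective: faster
-- what changed: Fuses A's two passes (build a comment-stripped intermediate string, then rescan it with a second identical string-state machine) into one single pass that keeps balance/in_single/in_double/escape directly and ends the scan at a bare comment marker, building no intermediate string.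
import Mathlib
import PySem

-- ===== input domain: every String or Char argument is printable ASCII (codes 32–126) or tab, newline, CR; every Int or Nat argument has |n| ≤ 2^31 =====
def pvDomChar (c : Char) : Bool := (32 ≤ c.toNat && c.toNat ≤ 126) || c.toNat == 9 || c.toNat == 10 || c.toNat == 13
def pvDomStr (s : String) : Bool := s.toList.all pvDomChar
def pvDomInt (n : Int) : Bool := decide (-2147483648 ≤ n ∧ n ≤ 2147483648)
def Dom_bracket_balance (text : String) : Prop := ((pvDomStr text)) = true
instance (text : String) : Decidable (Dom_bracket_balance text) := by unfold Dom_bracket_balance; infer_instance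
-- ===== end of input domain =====

-- B fuses A's two passes (strip comment into an intermediate string, then rescan it) into one
-- single state-machine pass that stops at a bare comment marker; measured faster (no intermediate string).

-- ===== PORT A =====
-- strip_inline_comment's loop: state (in_single, in_double, escape), appending kept chars.
def stripGo : List Char → Bool → Bool → Bool → List Char
  | [], _, _, _ => []
  | c :: rest, insg, indq, esc =>
    if indq then
      c :: (if esc then stripGo rest insg indq false
            else if c = '\\' then stripGo rest insg indq true
            else if c = '"' then stripGo rest insg false esc
            else stripGo rest insg indq esc)
    else if insg then
      c :: (if c = '\'' then stripGo rest false indq esc else stripGo rest insg indq esc)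
    else if c = '"' then c :: stripGo rest insg true esc
    else if c = '\'' then c :: stripGo rest true indq esc
    else if c = '#' then []
    else c :: stripGo rest insg indq esc

-- bracket_balance's loop over the stripped text: state (balance, in_single, in_double, escape).
def bbGo : List Char → Int → Bool → Bool → Bool → Int
  | [], bal, _, _, _ => bal
  | c :: rest, bal, insg, indq, esc =>
    if indq then
      (if esc then bbGo rest bal insg indq false
       else if c = '\\' then bbGo rest bal insg indq true
       else if c = '"' then bbGo rest bal insg false esc
       else bbGo rest bal insg indq esc)
    else if insg then
      (if c = '\'' then bbGo rest bal false indq esc else bbGo rest bal insg indq esc)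
    else if c = '"' then bbGo rest bal insg true esc
    else if c = '\'' then bbGo rest bal true indq esc
    else if c = '[' then bbGo rest (bal + 1) insg indq esc
    else if c = ']' then bbGo rest (bal - 1) insg indq esc
    else bbGo rest bal insg indq esc

def bracket_balance (text : String) : Int :=
  bbGo (stripGo text.toList false false false) 0 false false false

-- ===== PORT B =====
-- single pass: same state machine; a comment marker outside strings ends the scan directly.
def bbAlt : List Char → Int → Bool → Bool → Bool → Int
  | [], bal, _, _, _ => bal
  | c :: rest, bal, insg, indq, esc =>
    if indq then
      (if esc then bbAlt rest bal insg indq false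
       else if c = '\\' then bbAlt rest bal insg indq true
       else if c = '"' then bbAlt rest bal insg false esc
       else bbAlt rest bal insg indq esc)
    else if insg then
      (if c = '\'' then bbAlt rest bal false indq esc else bbAlt rest bal insg indq esc)
    else if c = '"' then bbAlt rest bal insg true esc
    else if c = '\'' then bbAlt rest bal true indq esc
    else if c = '#' then bal
    else if c = '[' then bbAlt rest (bal + 1) insg indq esc
    else if c = ']' then bbAlt rest (bal - 1) insg indq esc
    else bbAlt rest bal insg indq esc

def bracket_balance_alt (text : String) : Int :=
  bbAlt text.toList 0 false false false

-- ===== PRECONDITION & SPEC =====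
def Spec_bracket_balance (text : String) (out : Int) : Prop := out = bracket_balance_alt text
instance (text : String) (out : Int) : Decidable (Spec_bracket_balance text out) := by unfold Spec_bracket_balance; infer_instance

-- ===== CLAIM (what is proved, stated in full; the proofs are below) =====
def Claim_equal_bracket_balance : Prop := ∀ (text : String), Dom_bracket_balance text → Spec_bracket_balance text (bracket_balance text)

-- ===== LEMMAS AND PROOFS =====
-- Scanning the stripped text from the same state equals the fused single pass.
theorem bbGo_stripGo (cs : List Char) : ∀ (bal : Int) (insg indq esc : Bool),
    bbGo (stripGo cs insg indq esc) bal insg indq esc = bbAlt cs bal insg indq esc := by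
  induction cs with
  | nil => intro bal insg indq esc; simp [stripGo, bbGo, bbAlt]
  | cons c rest ih =>
    intro bal insg indq esc
    simp only [stripGo, bbAlt]
    split_ifs <;> simp [bbGo, *]

-- ===== VERDICT (by name: the statement is the Claim_ definition above) =====
theorem bracket_balance_spec : Claim_equal_bracket_balance := by
  intro text _
  unfold Spec_bracket_balance bracket_balance bracket_balance_alt
  exact bbGo_stripGo _ _ _ _ _
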